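-- pv_equiv track=rewrite | github.com/james-stuff/AdventofCode | main.py | day_18_get_number_positions
-- ===== SOURCE A (Python) =====
-- def day_18_get_number_positions(expression: str) -> dict:
--     number_positions = {}
--     numeric_indices = [i for i, ch in enumerate(expression) if ch.isnumeric()]
--     i_ni = 0
--     while i_ni < len(numeric_indices):
--         position = numeric_indices[i_ni]
--         number_positions[position] = int(expression[position])
--         if (i_ni < len(numeric_indices) - 1) and \
--                 numeric_indices[i_ni + 1] == numeric_indices[i_ni] + 1:
--             number_positions[position] = int(expression[position:position + 2])
--             i_ni += 1
--         i_ni += 1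
--     return number_positions
-- ===== SOURCE B (Python) =====
-- def day_18_get_number_positions(expression: str) -> dict:
--     number_positions = {}
--     i = 0
--     n = len(expression)
--     while i < n:
--         if expression[i].isnumeric():
--             if i + 1 < n and expression[i + 1].isnumeric():
--                 number_positions[i] = int(expression[i:i + 2])
--                 i += 2
--             else:
--                 number_positions[i] = int(expression[i])
--                 i += 1
--         else:
--             i += 1
--     return number_positions
-- ===== Notes on version B (the rewrite author's own statement) =====
-- stated objective: simpler
-- what changed: B scans the string directly with one index in a single while loop, pairing a digit with an immediately following digit on the spot, instead of A's two-phase approach of precomputing the list of numeric indices and walking it with consecutiveness arithmetic.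
import Mathlib
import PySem

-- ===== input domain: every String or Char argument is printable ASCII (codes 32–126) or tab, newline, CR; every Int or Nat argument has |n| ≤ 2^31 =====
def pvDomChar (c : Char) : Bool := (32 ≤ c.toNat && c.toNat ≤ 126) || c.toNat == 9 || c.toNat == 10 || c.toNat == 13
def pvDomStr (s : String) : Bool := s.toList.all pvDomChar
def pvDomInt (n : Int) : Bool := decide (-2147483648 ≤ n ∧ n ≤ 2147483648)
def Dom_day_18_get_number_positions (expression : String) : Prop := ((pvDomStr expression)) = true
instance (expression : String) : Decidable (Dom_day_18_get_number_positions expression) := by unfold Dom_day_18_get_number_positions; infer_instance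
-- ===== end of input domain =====

-- B replaces A's precomputed numeric-index list and consecutiveness arithmetic by a single
-- direct index scan of the string (objective: simpler).


-- ===== PORT A =====
-- A's while loop over the precomputed list of numeric indices, transliterated as structural
-- recursion on that list (i_ni += 2 = dropping two elements); the dict is a PySem.Dict.
-- On the ASCII domain 'ch.isnumeric()' is exactly PySem.Chars.isdigit, every looked-up index
-- is in range (pyGetD's default ' ' is unreachable) and int(...) of the digit substring
-- always parses (the .getD 0 after ofChars? is unreachable).
def pvALoop (cs : List Char) : List Int → PySem.Dict Int Int → PySem.Dict Int Int
  | [], d => d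
  | [p], d =>
      d.insert p ((PySem.Int.ofChars? [PySem.List.pyGetD cs p ' ']).getD 0)
  | p :: q :: rest, d =>
      let d1 := d.insert p ((PySem.Int.ofChars? [PySem.List.pyGetD cs p ' ']).getD 0)
      if q = p + 1 then
        pvALoop cs rest
          (d1.insert p ((PySem.Int.ofChars? (PySem.List.slice cs (some p) (some (p + 2)))).getD 0))
      else
        pvALoop cs (q :: rest) d1

def day_18_get_number_positions (expression : String) : List (Int × Int) :=
  (pvALoop expression.toList
    (((PySem.List.enumerate expression.toList 0).filter (fun p => PySem.Chars.isdigit p.2)).map (·.1))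
    PySem.Dict.empty).items

-- ===== PORT B =====
-- B's single while loop over the character positions (same PySem primitives as above;
-- Python's short-circuit 'i + 1 < n and …' is the ∧ of the branch condition).
def pvBLoop (cs : List Char) (i : Nat) (d : PySem.Dict Int Int) : PySem.Dict Int Int :=
  if h : i < cs.length then
    if PySem.Chars.isdigit (PySem.List.pyGetD cs (i : Int) ' ') then
      if i + 1 < cs.length ∧ PySem.Chars.isdigit (PySem.List.pyGetD cs ((i : Int) + 1) ' ') then
        pvBLoop cs (i + 2)
          (d.insert (i : Int)
            ((PySem.Int.ofChars? (PySem.List.slice cs (some (i : Int)) (some ((i : Int) + 2)))).getD 0))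
      else
        pvBLoop cs (i + 1)
          (d.insert (i : Int) ((PySem.Int.ofChars? [PySem.List.pyGetD cs (i : Int) ' ']).getD 0))
    else
      pvBLoop cs (i + 1) d
  else d
termination_by cs.length - i
decreasing_by all_goals omega

def day_18_get_number_positions_alt (expression : String) : List (Int × Int) :=
  (pvBLoop expression.toList 0 PySem.Dict.empty).items

-- ===== PRECONDITION & SPEC =====
def Spec_day_18_get_number_positions (expression : String) (out : List (Int × Int)) : Prop := out = day_18_get_number_positions_alt expression
instance (expression : String) (out : List (Int × Int)) : Decidable (Spec_day_18_get_number_positions expression out) := by unfold Spec_day_18_get_number_positions; infer_instance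

-- ===== CLAIM (what is proved, stated in full; the proofs are below) =====
def Claim_equal_day_18_get_number_positions : Prop := ∀ (expression : String), Dom_day_18_get_number_positions expression → Spec_day_18_get_number_positions expression (day_18_get_number_positions expression)

-- ===== LEMMAS AND PROOFS =====

-- The list of digit positions of cs, counting positions from i.
def pvDigits : List Char → Nat → List Int
  | [], _ => []
  | c :: t, i => if PySem.Chars.isdigit c then (i : Int) :: pvDigits t (i + 1) else pvDigits t (i + 1)

theorem pvDigits_enum (l : List Char) (i : Nat) :
    ((PySem.List.enumerate l (i : Int)).filter (fun p => PySem.Chars.isdigit p.2)).map (·.1)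
      = pvDigits l i := by
  induction l generalizing i with
  | nil => simp [pvDigits, PySem.List.enumerate_nil]
  | cons c t ih =>
      have ht := ih (i + 1)
      have h1 : (((i + 1 : Nat)) : Int) = (i : Int) + 1 := by push_cast; ring
      rw [h1] at ht
      by_cases h : PySem.Chars.isdigit c <;>
        simp [PySem.List.enumerate_cons, pvDigits, h, ht]

theorem pvDigits_ge (l : List Char) (i : Nat) (x : Int) (hx : x ∈ pvDigits l i) : (i : Int) ≤ x := by
  induction l generalizing i with
  | nil => simp [pvDigits] at hx
  | cons c t ih =>
      simp only [pvDigits] at hx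
      by_cases h : PySem.Chars.isdigit c <;> simp [h] at hx
      · rcases hx with rfl | hx
        · exact le_refl _
        · have := ih (i + 1) hx; push_cast at this ⊢; omega
      · have := ih (i + 1) hx; push_cast at this ⊢; omega

theorem pvDigits_drop (cs : List Char) (i : Nat) (h : i < cs.length) :
    pvDigits (cs.drop i) i
      = if PySem.Chars.isdigit (PySem.List.pyGetD cs (i : Int) ' ')
        then (i : Int) :: pvDigits (cs.drop (i + 1)) (i + 1)
        else pvDigits (cs.drop (i + 1)) (i + 1) := by
  rw [List.drop_eq_getElem_cons h]
  simp [pvDigits, PySem.List.pyGetD_natCast, List.getD, List.getElem?_eq_getElem h]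

theorem pvMain (n : Nat) : ∀ (cs : List Char) (i : Nat) (d : PySem.Dict Int Int),
    cs.length ≤ i + n → pvALoop cs (pvDigits (cs.drop i) i) d = pvBLoop cs i d := by
  induction n with
  | zero =>
      intro cs i d hle
      rw [List.drop_eq_nil_of_le (by omega), pvBLoop]
      simp [pvALoop, pvDigits, show ¬ i < cs.length by omega]
  | succ n ih =>
      intro cs i d hle
      by_cases hi : i < cs.length
      case neg =>
        rw [List.drop_eq_nil_of_le (by omega), pvBLoop]
        simp [pvALoop, pvDigits, hi]
      case pos =>
      rw [pvDigits_drop cs i hi]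
      have hgi : PySem.List.pyGetD cs ((i : Int)) ' ' = cs[i] := by
        simp [PySem.List.pyGetD_natCast, List.getD, List.getElem?_eq_getElem hi]
      by_cases hd : PySem.Chars.isdigit (PySem.List.pyGetD cs (i : Int) ' ') = true
      case neg =>
        rw [if_neg hd, ih cs (i + 1) d (by omega)]
        conv_rhs => rw [pvBLoop]
        rw [hgi] at hd
        simp [hi, hd]
      case pos =>
      rw [if_pos hd]
      rw [hgi] at hd
      by_cases h2 : i + 1 < cs.length ∧
          PySem.Chars.isdigit (PySem.List.pyGetD cs ((i : Int) + 1) ' ') = true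
      case pos =>
        obtain ⟨h2a, h2b⟩ := h2
        have hstep := pvDigits_drop cs (i + 1) h2a
        have hcast : (((i + 1 : Nat)) : Int) = (i : Int) + 1 := by push_cast; ring
        rw [hcast] at hstep
        rw [hstep, if_pos h2b]
        simp only [pvALoop]
        rw [PySem.Dict.insert_insert_self]
        rw [show i + 1 + 1 = i + 2 from rfl]
        rw [ih cs (i + 2) _ (by omega)]
        have hgi1 : PySem.List.pyGetD cs ((i : Int) + 1) ' ' = cs[i + 1] := by
          rw [show ((i : Int) + 1) = (((i + 1 : Nat)) : Int) by push_cast; ring,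
            PySem.List.pyGetD_natCast]
          exact List.getD_eq_getElem cs ' ' h2a
        rw [hgi1] at h2b
        conv_rhs => rw [pvBLoop]
        simp [hi, hd, h2a, h2b, hgi, hgi1]
      case neg =>
        have hge : ∀ x ∈ pvDigits (cs.drop (i + 1)) (i + 1), (i : Int) + 2 ≤ x := by
          intro x hx
          by_cases h1 : i + 1 < cs.length
          · have hne : ¬ PySem.Chars.isdigit (PySem.List.pyGetD cs ((i : Int) + 1) ' ') = true :=
              fun hc => h2 ⟨h1, hc⟩
            have hstep := pvDigits_drop cs (i + 1) h1
            have hcast : (((i + 1 : Nat)) : Int) = (i : Int) + 1 := by push_cast; ring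
            rw [hcast, if_neg hne] at hstep
            rw [hstep] at hx
            have := pvDigits_ge _ _ _ hx
            push_cast at this ⊢; omega
          · rw [List.drop_eq_nil_of_le (by omega)] at hx
            simp [pvDigits] at hx
        have hA : pvALoop cs ((i : Int) :: pvDigits (cs.drop (i + 1)) (i + 1)) d
            = pvALoop cs (pvDigits (cs.drop (i + 1)) (i + 1))
                (d.insert (i : Int) ((PySem.Int.ofChars? [PySem.List.pyGetD cs (i : Int) ' ']).getD 0)) := by
          cases htl : pvDigits (cs.drop (i + 1)) (i + 1) with
          | nil => simp [pvALoop]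
          | cons q rest =>
              have hq := hge q (by rw [htl]; exact List.mem_cons_self)
              have hne2 : ¬ (q = (i : Int) + 1) := by omega
              simp [pvALoop, hne2]
        rw [hA, ih cs (i + 1) _ (by omega)]
        conv_rhs => rw [pvBLoop]
        simp [hi, hd, h2, hgi]

-- ===== VERDICT (by name: the statement is the Claim_ definition above) =====
theorem day_18_get_number_positions_spec : Claim_equal_day_18_get_number_positions := by
  intro expression _
  unfold Spec_day_18_get_number_positions day_18_get_number_positions day_18_get_number_positions_alt
  have he := pvDigits_enum expression.toList 0
  norm_num at he
  rw [he]
  have h := pvMain expression.toList.length expression.toList 0 PySem.Dict.empty (by omega)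
  rw [List.drop_zero] at h
  rw [h]
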